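-- pv_equiv track=rewrite | github.com/semzindik/- | task27.py | shortener
-- ===== SOURCE A (Python) =====
-- def shortener(st):
--     stack = []
--     result = []
--
--     for char in st:
--         if char == '(':
--             stack.append(len(result))
--         elif char == ')':
--             if stack:
--                 start_index = stack.pop()
--                 result = result[:start_index]
--         else:
--             if not stack:
--                 result.append(char)
--
--     return ''.join(result)
-- ===== SOURCE B (Python) =====
-- def _skip(st, i):
--     # return the index just past the ')' matching the '(' before position i
--     # (or len(st) if it is never closed)
--     depth = 1
--     n = len(st)
--     while i < n and depth:
--         c = st[i]
--         if c == '(':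
--             depth += 1
--         elif c == ')':
--             depth -= 1
--         i += 1
--     return i
--
-- def shortener(st):
--     parts = []
--     i = 0
--     n = len(st)
--     while i < n:
--         c = st[i]
--         if c == '(':
--             i = _skip(st, i + 1)
--         else:
--             if c != ')':
--                 parts.append(c)
--             i += 1
--     return ''.join(parts)
-- ===== Notes on version B (the rewrite author's own statement) =====
-- stated objective: alternative
-- what changed: Instead of A's stack of saved indices with repeated list-slice truncation, B scans only top-level characters and, at each opening parenthesis, jumps past the whole matching parenthesized block with a dedicated skip scan, so nested content is never touched by the output builder.
import Mathlib
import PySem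

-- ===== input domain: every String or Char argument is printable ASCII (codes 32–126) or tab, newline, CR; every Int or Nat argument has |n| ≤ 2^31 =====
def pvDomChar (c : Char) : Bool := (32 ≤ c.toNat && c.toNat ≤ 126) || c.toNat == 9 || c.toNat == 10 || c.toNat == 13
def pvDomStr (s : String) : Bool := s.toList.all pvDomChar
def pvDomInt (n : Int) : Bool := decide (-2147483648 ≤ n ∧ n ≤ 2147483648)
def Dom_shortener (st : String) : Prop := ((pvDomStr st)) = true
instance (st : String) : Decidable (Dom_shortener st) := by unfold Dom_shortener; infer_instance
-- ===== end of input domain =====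

-- B replaces A's index-stack and repeated list-slice truncation by a top-level scan that
-- skips each parenthesized block wholesale with a dedicated helper scan.


-- ===== PORT A =====
-- one loop iteration of A: state (stack of saved lengths, result); result[:i] with 0 ≤ i = List.take
def shortenerStep (s : List Nat × List Char) (ch : Char) : List Nat × List Char :=
  if ch = '(' then (s.2.length :: s.1, s.2)
  else if ch = ')' then
    match s.1 with
    | [] => s
    | i :: rest => (rest, s.2.take i)
  else if s.1.isEmpty then (s.1, s.2 ++ [ch]) else s

def shortener (st : String) : String :=
  String.ofList (st.toList.foldl shortenerStep ([], [])).2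

-- ===== PORT B =====
-- _skip: consume characters (here: the rest of the string as a list) until the open
-- parenthesis is closed (nesting depth d reaches 0) or the input ends; return the remainder.
def skipParen (cs : List Char) (d : Nat) : List Char :=
  match cs with
  | [] => []
  | c :: rest =>
    if d = 0 then c :: rest
    else skipParen rest (if c = '(' then d + 1 else if c = ')' then d - 1 else d)

theorem skipParen_length_le (cs : List Char) (d : Nat) : (skipParen cs d).length ≤ cs.length := by
  induction cs generalizing d with
  | nil => simp [skipParen]
  | cons c rest ih =>
    simp only [skipParen]
    split
    · simp
    · exact Nat.le_trans (ih _) (by simp)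

-- the main while-loop of B: keep top-level characters, skip parenthesized blocks wholesale
def shortenerGo (cs : List Char) : List Char :=
  match cs with
  | [] => []
  | c :: rest =>
    if c = '(' then shortenerGo (skipParen rest 1)
    else if c = ')' then shortenerGo rest
    else c :: shortenerGo rest
termination_by cs.length
decreasing_by
  · exact Nat.lt_succ_of_le (skipParen_length_le rest 1)
  · simp
  · simp

def shortener_alt (st : String) : String :=
  String.ofList (shortenerGo st.toList)

-- ===== PRECONDITION & SPEC =====
def Spec_shortener (st : String) (out : String) : Prop := out = shortener_alt st
instance (st : String) (out : String) : Decidable (Spec_shortener st out) := by unfold Spec_shortener; infer_instance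

-- ===== CLAIM (what is proved, stated in full; the proofs are below) =====
def Claim_equal_shortener : Prop := ∀ (st : String), Dom_shortener st → Spec_shortener st (shortener st)

-- ===== LEMMAS AND PROOFS =====
-- Proof-only intermediate: a depth-counter fold bridging A's stack fold and B's skip recursion.
def depthStep (s : Nat × List Char) (ch : Char) : Nat × List Char :=
  if ch = '(' then (s.1 + 1, s.2)
  else if ch = ')' then (if s.1 ≠ 0 then (s.1 - 1, s.2) else s)
  else if s.1 = 0 then (s.1, s.2 ++ [ch]) else s

-- A = depth fold: every saved index on A's stack equals the current result length
-- (each truncation is therefore a no-op), and the stack length is the depth.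
theorem shortener_stack_inv (cs : List Char) (stack : List Nat) (d : Nat) (res : List Char)
    (hlen : stack.length = d) (hmem : ∀ i ∈ stack, i = res.length) :
    (cs.foldl shortenerStep (stack, res)).2 = (cs.foldl depthStep (d, res)).2 := by
  induction cs generalizing stack d res with
  | nil => simp
  | cons ch cs ih =>
    simp only [List.foldl_cons]
    by_cases h1 : ch = '('
    · simp only [shortenerStep, depthStep, h1, ite_true]
      refine ih (res.length :: stack) (d + 1) res (by simp [hlen]) ?_
      intro i hi
      rcases List.mem_cons.mp hi with h | h
      · exact h
      · exact hmem i h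
    · by_cases h2 : ch = ')'
      · simp only [shortenerStep, depthStep, h2, ite_true]
        cases stack with
        | nil =>
          have hd : d = 0 := by simpa using hlen.symm
          simp only [hd]
          exact ih [] 0 res (by simp) (by simp)
        | cons i rest =>
          have hi : i = res.length := hmem i (by simp)
          have hd : d ≠ 0 := by simp [← hlen]
          simp only [hi, List.take_length, if_pos hd]
          exact ih rest (d - 1) res (by simp [← hlen]) (fun j hj => hmem j (by simp [hj]))
      · simp only [shortenerStep, depthStep, if_neg h1, if_neg h2]
        cases stack with
        | nil =>
          have hd : d = 0 := by simpa using hlen.symm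
          simp only [List.isEmpty_nil, hd, ite_true]
          exact ih [] 0 (res ++ [ch]) (by simp) (by simp)
        | cons i rest =>
          have hd : d ≠ 0 := by simp [← hlen]
          simp only [List.isEmpty_cons, hd, ite_false, Bool.false_eq_true]
          exact ih (i :: rest) d res hlen hmem

-- unfolding equations, stated once so the proofs never ask simp to unfold the recursions
theorem skipParen_zero (cs : List Char) : skipParen cs 0 = cs := by
  cases cs <;> simp [skipParen]

theorem skipParen_cons (c : Char) (rest : List Char) (d : Nat) (hd : d ≠ 0) :
    skipParen (c :: rest) d
      = skipParen rest (if c = '(' then d + 1 else if c = ')' then d - 1 else d) := by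
  simp [skipParen, hd]

theorem go_nil : shortenerGo [] = [] := by rw [shortenerGo]

theorem go_open (rest : List Char) :
    shortenerGo ('(' :: rest) = shortenerGo (skipParen rest 1) := by
  rw [shortenerGo]; rfl

theorem go_close (rest : List Char) : shortenerGo (')' :: rest) = shortenerGo rest := by
  rw [shortenerGo]; rfl

theorem go_other (c : Char) (rest : List Char) (h1 : c ≠ '(') (h2 : c ≠ ')') :
    shortenerGo (c :: rest) = c :: shortenerGo rest := by
  rw [shortenerGo]; simp [h1, h2]

-- depth fold = B's skip recursion: at depth d the fold appends nothing until depth 0,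
-- exactly the suffix skipParen computes.
theorem depth_fold_eq_go (cs : List Char) (d : Nat) (acc : List Char) :
    (cs.foldl depthStep (d, acc)).2 = acc ++ shortenerGo (skipParen cs d) := by
  induction cs generalizing d acc with
  | nil => simp [skipParen, go_nil]
  | cons c rest ih =>
    by_cases h1 : c = '('
    · subst h1
      by_cases hd : d = 0
      · subst hd
        rw [skipParen_zero, go_open]
        simpa [depthStep, skipParen_zero] using ih 1 acc
      · rw [skipParen_cons _ _ _ hd]
        simpa [depthStep, hd] using ih (d + 1) acc
    · by_cases h2 : c = ')'
      · subst h2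
        by_cases hd : d = 0
        · subst hd
          rw [skipParen_zero, go_close]
          simpa [depthStep, skipParen_zero] using ih 0 acc
        · rw [skipParen_cons _ _ _ hd]
          simpa [depthStep, hd, h1] using ih (d - 1) acc
      · by_cases hd : d = 0
        · subst hd
          rw [skipParen_zero, go_other c rest h1 h2]
          simpa [depthStep, h1, h2, skipParen_zero] using ih 0 (acc ++ [c])
        · rw [skipParen_cons _ _ _ hd]
          simpa [depthStep, h1, h2, hd] using ih d acc

-- ===== VERDICT (by name: the statement is the Claim_ definition above) =====
theorem shortener_spec : Claim_equal_shortener := by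
  intro st _
  unfold Spec_shortener shortener shortener_alt
  rw [shortener_stack_inv st.toList [] 0 [] rfl (by simp), depth_fold_eq_go]
  simp [skipParen_zero]
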